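-- pv_equiv track=rewrite | github.com/sankaranv/graphical-models-688 | crf.py | idx2str
-- ===== SOURCE A (Python) =====
-- def idx2str(idx):
--     idx = ['e' if x == 0 else x for x in idx]
--     idx = ['t' if x == 1 else x for x in idx]
--     idx = ['a' if x == 2 else x for x in idx]
--     idx = ['i' if x == 3 else x for x in idx]
--     idx = ['n' if x == 4 else x for x in idx]
--     idx = ['o' if x == 5 else x for x in idx]
--     idx = ['s' if x == 6 else x for x in idx]
--     idx = ['h' if x == 7 else x for x in idx]
--     idx = ['r' if x == 8 else x for x in idx]
--     idx = ['d' if x == 9 else x for x in idx]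
--     str = ''.join(idx)
--     return str
-- ===== SOURCE B (Python) =====
-- _MAP = {0: 'e', 1: 't', 2: 'a', 3: 'i', 4: 'n', 5: 'o', 6: 's', 7: 'h', 8: 'r', 9: 'd'}
--
-- def idx2str(idx):
--     return ''.join(_MAP.get(x, x) for x in idx)
-- ===== Notes on version B (the rewrite author's own statement) =====
-- stated objective: simpler
-- what changed: Replaces ten sequential full-list comprehension passes (one per digit) with a single pass over a fixed lookup dict, joining directly.
import Mathlib
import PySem

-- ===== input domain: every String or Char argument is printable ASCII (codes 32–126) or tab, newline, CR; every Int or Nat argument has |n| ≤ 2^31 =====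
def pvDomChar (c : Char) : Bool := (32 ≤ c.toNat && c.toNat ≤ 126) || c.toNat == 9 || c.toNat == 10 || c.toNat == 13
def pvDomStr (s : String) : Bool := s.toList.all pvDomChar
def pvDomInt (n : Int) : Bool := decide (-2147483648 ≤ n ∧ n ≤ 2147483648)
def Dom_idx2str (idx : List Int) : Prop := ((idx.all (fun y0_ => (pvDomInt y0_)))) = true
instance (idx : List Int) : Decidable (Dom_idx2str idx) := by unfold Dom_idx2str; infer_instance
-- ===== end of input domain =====

-- B replaces A's ten sequential full-list substitution passes with one pass over a fixed lookup table (simpler).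

-- ===== PORT A =====
-- A's list holds a mix of ints and already-substituted characters; we model that with Int ⊕ Char.
-- One comprehension pass: replace the int k by the char c, leave everything else alone.
def pvStep (k : Int) (c : Char) (v : Int ⊕ Char) : Int ⊕ Char :=
  match v with
  | .inl x => if x = k then .inr c else .inl x
  | .inr s => .inr s

-- ''.join(idx): exact when every element is a char (guaranteed by Pre_idx2str);
-- on a leftover int Python's join raises TypeError — those inputs are outside Pre_idx2str.
def pvJoin (l : List (Int ⊕ Char)) : String :=
  String.mk (l.filterMap (fun v => match v with | .inr c => some c | .inl _ => none))

def idx2str (idx : List Int) : String :=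
  let l0 := idx.map Sum.inl
  let l1 := l0.map (pvStep 0 'e')
  let l2 := l1.map (pvStep 1 't')
  let l3 := l2.map (pvStep 2 'a')
  let l4 := l3.map (pvStep 3 'i')
  let l5 := l4.map (pvStep 4 'n')
  let l6 := l5.map (pvStep 5 'o')
  let l7 := l6.map (pvStep 6 's')
  let l8 := l7.map (pvStep 7 'h')
  let l9 := l8.map (pvStep 8 'r')
  let l10 := l9.map (pvStep 9 'd')
  pvJoin l10

-- ===== PORT B =====
def pvMap : PySem.Dict Int Char :=
  PySem.Dict.ofList [(0, 'e'), (1, 't'), (2, 'a'), (3, 'i'), (4, 'n'), (5, 'o'), (6, 's'), (7, 'h'), (8, 'r'), (9, 'd')]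

-- _MAP.get(x, x) keeps an unmapped int, on which join raises TypeError (outside Pre_idx2str);
-- exact on Pre_idx2str, where every element is found in the dict.
def idx2str_alt (idx : List Int) : String :=
  String.mk (idx.filterMap (fun x => PySem.Dict.get? pvMap x))

-- ===== PRECONDITION & SPEC =====
-- Pre_ excludes inputs with an element outside 0..9: there both A and B raise TypeError in ''.join.
def Pre_idx2str (idx : List Int) : Prop := ∀ x ∈ idx, 0 ≤ x ∧ x ≤ 9
instance (idx : List Int) : Decidable (Pre_idx2str idx) := by unfold Pre_idx2str; infer_instance
def pvWitness_idx2str : List Int := [0, 3, 9, 5, 2]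

def Spec_idx2str (idx : List Int) (out : String) : Prop := out = idx2str_alt idx
instance (idx : List Int) (out : String) : Decidable (Spec_idx2str idx out) := by unfold Spec_idx2str; infer_instance

-- ===== CLAIM (what is proved, stated in full; the proofs are below) =====
def Claim_equal_idx2str : Prop := ∀ (idx : List Int), Dom_idx2str idx → Pre_idx2str idx → Spec_idx2str idx (idx2str idx)

-- ===== LEMMAS AND PROOFS =====
-- the ten passes composed, as one function on a single element
def pvComposed (x : Int) : Int ⊕ Char :=
  pvStep 9 'd' (pvStep 8 'r' (pvStep 7 'h' (pvStep 6 's' (pvStep 5 'o'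
    (pvStep 4 'n' (pvStep 3 'i' (pvStep 2 'a' (pvStep 1 't' (pvStep 0 'e' (Sum.inl x))))))))))

theorem pvGet_isSome (x : Int) (h0 : 0 ≤ x) (h9 : x ≤ 9) :
    (PySem.Dict.get? pvMap x).isSome := by
  interval_cases x <;> decide

theorem pvComposed_eq (x : Int) (h0 : 0 ≤ x) (h9 : x ≤ 9) :
    pvComposed x = match PySem.Dict.get? pvMap x with | some c => Sum.inr c | none => Sum.inl x := by
  interval_cases x <;> decide

theorem pvElem_eq (idx : List Int) :
    ((((((((((idx.map Sum.inl).map (pvStep 0 'e')).map (pvStep 1 't')).map (pvStep 2 'a')).map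
      (pvStep 3 'i')).map (pvStep 4 'n')).map (pvStep 5 'o')).map (pvStep 6 's')).map
      (pvStep 7 'h')).map (pvStep 8 'r')).map (pvStep 9 'd')
    = idx.map pvComposed := by
  simp only [List.map_map]
  apply List.map_congr_left
  intro x _
  rfl

theorem idx2str_spec' (idx : List Int) (h : Pre_idx2str idx) :
    idx2str idx = idx2str_alt idx := by
  unfold idx2str idx2str_alt pvJoin
  simp only []
  rw [pvElem_eq idx]
  congr 1
  induction idx with
  | nil => rfl
  | cons a t ih =>
    have ha := h a (List.mem_cons_self ..)
    have ht : Pre_idx2str t := fun x hx => h x (List.mem_cons_of_mem _ hx)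
    have hc := pvComposed_eq a ha.1 ha.2
    simp only [List.map_cons, List.filterMap_cons]
    rw [hc]
    cases hg : PySem.Dict.get? pvMap a with
    | some c => simp [ih ht]
    | none =>
      have hs := pvGet_isSome a ha.1 ha.2
      rw [hg] at hs
      simp at hs

-- ===== VERDICT (by name: the statement is the Claim_ definition above) =====
theorem idx2str_spec : Claim_equal_idx2str := by
  intro idx _ hpre
  exact idx2str_spec' idx hpre
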